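-- pv_equiv track=rewrite | github.com/nen9mA0/Instruction-Generator | myInsGen/encoder/util.py | posix_slashes
-- ===== SOURCE A (Python) =====
-- def posix_slashes(s):
--     """convert to posix slashes. Do not flip slashes immediately before spaces
--     @type s: string  or list of strings
--     @param s: path name(s)
--
--     @rtype: string or list of strings
--     @return: string(s) with forward slashes
--     """
--     if isinstance(s, list):
--         return list(map(posix_slashes, s))
--     # t = re.sub(r'\\','/',s,0) # replace all
--     last = len(s)-1
--     t = []
--     for i, a in enumerate(s):
--         x = a
--         if a == '\\':
--             if i == last:
--                 x = '/'
--             elif s[i+1] != ' ':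
--                 x = '/'
--         t.append(x)
--     return ''.join(t)
-- ===== SOURCE B (Python) =====
-- import re
--
-- _BS = re.compile(r'\\(?! )')
--
-- def posix_slashes(s):
--     if isinstance(s, list):
--         return list(map(posix_slashes, s))
--     return _BS.sub('/', s)
-- ===== Notes on version B (the rewrite author's own statement) =====
-- stated objective: idiomatic
-- what changed: Replaces the hand-written index/enumerate loop with a single regex substitution using a negative lookahead (backslash not followed by a space, which also matches at end-of-string), keeping the list-recursion branch; the scan runs in the regex engine's C code.
import Mathlib
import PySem

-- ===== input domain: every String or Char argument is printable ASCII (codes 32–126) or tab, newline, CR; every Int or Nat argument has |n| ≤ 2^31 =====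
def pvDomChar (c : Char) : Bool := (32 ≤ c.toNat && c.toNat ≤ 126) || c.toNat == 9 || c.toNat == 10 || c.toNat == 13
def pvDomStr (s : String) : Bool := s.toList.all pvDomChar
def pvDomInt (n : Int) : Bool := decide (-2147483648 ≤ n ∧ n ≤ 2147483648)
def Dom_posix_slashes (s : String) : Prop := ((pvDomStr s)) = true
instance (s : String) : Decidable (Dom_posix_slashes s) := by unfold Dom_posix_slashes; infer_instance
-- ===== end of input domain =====

-- B replaces A's index-based enumerate loop with a one-pass left-to-right scan (regex '\\(?! )' in Python);
-- the String branch only (the Python list branch is outside this signature). Objective: idiomatic.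

-- ===== PORT A =====
-- literal port of A's string branch: last = len(s)-1; loop over enumerate(s) appending x to t.
-- s[i+1] is read only when i ≠ last, hence always in range: the .getD default is never used.
def posix_slashes (s : String) : String :=
  let cs := s.toList
  let last : Int := (cs.length : Int) - 1
  let t : List Char := (PySem.List.enumerate cs).foldl (fun t ia =>
    let i := ia.1
    let a := ia.2
    let x : Char :=
      if a = '\\' then
        if i = last then '/'
        else if (PySem.Str.pyGet? s (i + 1)).getD a ≠ ' ' then '/' else a
      else a
    t ++ [x]) []
  String.ofList t

-- ===== PORT B =====
-- Source B's regex sub scans left to right: a '\' not followed by ' ' (including at end of string)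
-- becomes '/', anything else is copied; this recursion is that scan, exact on all strings.
def pyToPosixB : List Char → List Char
  | [] => []
  | '\\' :: rest => (if rest.head? = some ' ' then '\\' else '/') :: pyToPosixB rest
  | c :: rest => c :: pyToPosixB rest

def posix_slashes_alt (s : String) : String := String.ofList (pyToPosixB s.toList)

-- ===== PRECONDITION & SPEC =====
def Spec_posix_slashes (s : String) (out : String) : Prop := out = posix_slashes_alt s
instance (s : String) (out : String) : Decidable (Spec_posix_slashes s out) := by unfold Spec_posix_slashes; infer_instance

-- ===== CLAIM (what is proved, stated in full; the proofs are below) =====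
def Claim_equal_posix_slashes : Prop := ∀ (s : String), Dom_posix_slashes s → Spec_posix_slashes s (posix_slashes s)

-- ===== LEMMAS AND PROOFS =====

theorem pyToPosixB_cons_ne (c : Char) (rest : List Char) (hc : c ≠ '\\') :
    pyToPosixB (c :: rest) = c :: pyToPosixB rest := by
  conv_lhs => rw [pyToPosixB.eq_def]
  split
  · simp_all
  · next heq => exact absurd (by injection heq) hc
  · next heq =>
      injection heq with h1 h2
      rw [h1, h2]

theorem posix_key : ∀ (suf pre : List Char),
    (PySem.List.enumerate suf (pre.length : Int)).map (fun ia =>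
      let i := ia.1
      let a := ia.2
      if a = '\\' then
        if i = ((pre ++ suf).length : Int) - 1 then '/'
        else if (PySem.List.pyGet? (pre ++ suf) (i + 1)).getD a ≠ ' ' then '/' else a
      else a) = pyToPosixB suf := by
  intro suf
  induction suf with
  | nil => intro pre; simp [PySem.List.enumerate_nil, pyToPosixB]
  | cons c rest ih =>
    intro pre
    rw [PySem.List.enumerate_cons, List.map_cons]
    have hlen : ((pre.length : Int) + 1) = (((pre ++ [c]).length : Nat) : Int) := by
      simp
    have happ : pre ++ c :: rest = (pre ++ [c]) ++ rest := by simp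
    have htail : (PySem.List.enumerate rest ((pre.length : Int) + 1)).map (fun ia =>
        let i := ia.1
        let a := ia.2
        if a = '\\' then
          if i = ((pre ++ c :: rest).length : Int) - 1 then '/'
          else if (PySem.List.pyGet? (pre ++ c :: rest) (i + 1)).getD a ≠ ' ' then '/' else a
        else a) = pyToPosixB rest := by
      rw [hlen, happ]
      exact ih (pre ++ [c])
    by_cases hc : c = '\\'
    · subst hc
      rw [show pyToPosixB ('\\' :: rest) =
            (if rest.head? = some ' ' then '\\' else '/') :: pyToPosixB rest from rfl, ← htail]
      congr 1
      cases rest with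
      | nil => simp
      | cons d ds =>
        have hget : PySem.List.pyGet? (pre ++ '\\' :: d :: ds) ((pre.length : Int) + 1) = some d := by
          have h1 : pre ++ '\\' :: d :: ds = (pre ++ ['\\']) ++ d :: ds := by simp
          have h2 : ((pre.length : Int) + 1) = (((pre ++ ['\\']).length : Nat) : Int) := by simp
          rw [h1, h2]
          exact PySem.List.pyGet?_append_length _ _ _
        have hne : ¬ ((pre.length : Int) = ((pre ++ '\\' :: d :: ds).length : Int) - 1) := by
          simp
          omega
        simp only [if_neg hne, hget, Option.getD_some, List.head?_cons]
        by_cases hd : d = ' ' <;> simp [hd]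
    · rw [pyToPosixB_cons_ne c rest hc, ← htail]
      congr 1
      simp [hc]

-- ===== VERDICT (by name: the statement is the Claim_ definition above) =====
theorem posix_slashes_spec : Claim_equal_posix_slashes := by
  intro s _
  unfold Spec_posix_slashes posix_slashes posix_slashes_alt
  simp only [PySem.List.foldl_append_singleton_eq_map, List.nil_append]
  congr 1
  have h := posix_key s.toList []
  simpa [PySem.Str.pyGet?] using h
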